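-- pv_equiv track=rewrite | github.com/speky/python | renthouse/budapestingatlan.py | __set_district
-- ===== SOURCE A (Python) =====
-- def __set_district(district):
--     _result = ""
--     _prefix = "budapest-"
--     _postfix = "-ker"
--     for num in district.split('+'):
--         _result += _prefix + num + _postfix + '+'
--     _result = _result[:-1]
--     return _result+':'
-- ===== SOURCE B (Python) =====
-- def __set_district(district):
--     return "budapest-" + district.replace('+', '-ker+budapest-') + '-ker' + ':'
-- ===== Notes on version B (the rewrite author's own statement) =====
-- stated objective: simpler
-- what changed: Replaced the split/per-token-loop/trailing-separator-trim with a single str.replace that rewrites each separator boundary into postfix-plus-prefix and wraps the whole string once.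
import Mathlib
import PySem

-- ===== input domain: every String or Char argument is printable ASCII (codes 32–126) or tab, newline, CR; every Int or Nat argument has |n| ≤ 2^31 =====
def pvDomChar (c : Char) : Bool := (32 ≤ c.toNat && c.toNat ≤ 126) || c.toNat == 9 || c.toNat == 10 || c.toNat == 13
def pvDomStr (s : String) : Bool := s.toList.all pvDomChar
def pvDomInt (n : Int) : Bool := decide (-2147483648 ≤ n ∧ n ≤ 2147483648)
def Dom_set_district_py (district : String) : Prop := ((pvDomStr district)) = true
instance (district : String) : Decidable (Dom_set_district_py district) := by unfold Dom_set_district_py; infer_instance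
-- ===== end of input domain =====

-- B replaces A's split/per-token-loop/trailing-'+'-trim by one str.replace on the '+' boundaries; return values are proved equal on all inputs.

-- ===== PORT A =====
-- A: split on '+', append "budapest-" ++ num ++ "-ker" ++ "+" per token, drop the last char, add ':'.
def set_district_py (district : String) : String :=
  String.ofList
    (PySem.List.slice
      ((PySem.Chars.splitOn district.toList ['+']).foldl
        (fun acc num => acc ++ ("budapest-".toList ++ num ++ "-ker".toList ++ ['+'])) [])
      none (some (-1)) ++ [':'])

-- ===== PORT B =====
-- B: "budapest-" + district.replace('+', '-ker+budapest-') + '-ker' + ':'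
def set_district_py_alt (district : String) : String :=
  String.ofList ("budapest-".toList ++
    PySem.Chars.replace district.toList ['+'] "-ker+budapest-".toList ++
    "-ker".toList ++ [':'])

-- ===== PRECONDITION & SPEC =====
def Spec_set_district_py (district : String) (out : String) : Prop := out = set_district_py_alt district
instance (district : String) (out : String) : Decidable (Spec_set_district_py district out) := by unfold Spec_set_district_py; infer_instance

-- ===== CLAIM (what is proved, stated in full; the proofs are below) =====
def Claim_equal_set_district_py : Prop := ∀ (district : String), Dom_set_district_py district → Spec_set_district_py district (set_district_py district)

-- ===== LEMMAS AND PROOFS =====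
def pvSplitP (sep : List Char) : List Char → List (List Char)
  | [] => [[]]
  | c :: t =>
    if h : sep.isPrefixOf (c :: t) = true ∧ sep ≠ [] then
      [] :: pvSplitP sep (List.drop sep.length (c :: t))
    else
      (pvSplitP sep t).modifyHead (c :: ·)
  termination_by l => l.length
  decreasing_by
    · have : 1 ≤ sep.length := by
        cases sep with
        | nil => exact absurd rfl h.2
        | cons a s => simp
      simp [List.length_drop]; omega
    · simp

theorem pvSplitP_ne_nil (sep l : List Char) : pvSplitP sep l ≠ [] := by
  fun_induction pvSplitP sep l with
  | case1 => simp
  | case2 c t h ih => simp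
  | case3 c t h ih =>
    cases hs : pvSplitP sep t with
    | nil => exact absurd hs ih
    | cons a r => simp [hs]

theorem pvSplitOn_go_eq (sep : List Char) (hsep : sep ≠ []) :
    ∀ (fuel : Nat) (l cur : List Char) (toks : List (List Char)),
      l.length ≤ fuel →
      PySem.Chars.splitOn.go sep fuel l cur toks =
        toks.reverse ++ (pvSplitP sep l).modifyHead (cur.reverse ++ ·) := by
  intro fuel
  induction fuel with
  | zero =>
    intro l cur toks hl
    have : l = [] := by cases l <;> simp_all
    subst this
    rw [PySem.Chars.splitOn.go.eq_def]
    simp [pvSplitP]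
  | succ fuel ih =>
    intro l cur toks hl
    cases l with
    | nil =>
      rw [PySem.Chars.splitOn.go.eq_def]
      simp [pvSplitP]
    | cons c t =>
      rw [PySem.Chars.splitOn.go.eq_def]
      by_cases hp : sep.isPrefixOf (c :: t) = true
      · have hlen : 1 ≤ sep.length := by
          cases sep with
          | nil => exact absurd rfl hsep
          | cons a s => simp
        have hd : (List.drop sep.length (c :: t)).length ≤ fuel := by
          simp [List.length_drop]; simp at hl; omega
        simp only [hp, if_true]
        rw [ih _ _ _ hd]
        rw [pvSplitP]
        simp [hp, hsep]
        exact congrFun List.modifyHead_id _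
      · simp only [hp]
        have ht : t.length ≤ fuel := by simp at hl; omega
        rw [ih _ _ _ ht]
        rw [pvSplitP]
        simp [hp]
        obtain ⟨hd, rest, hs⟩ := List.exists_cons_of_ne_nil (pvSplitP_ne_nil sep t)
        rw [hs]
        simp

def pvReplaceP (sep new : List Char) : List Char → List Char
  | [] => []
  | c :: t =>
    if h : sep.isPrefixOf (c :: t) = true ∧ sep ≠ [] then
      new ++ pvReplaceP sep new (List.drop sep.length (c :: t))
    else
      c :: pvReplaceP sep new t
  termination_by l => l.length
  decreasing_by
    · have : 1 ≤ sep.length := by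
        cases sep with
        | nil => exact absurd rfl h.2
        | cons a s => simp
      simp [List.length_drop]; omega
    · simp

theorem pvReplace_go_eq (old new : List Char) (hold : old ≠ []) :
    ∀ (fuel : Nat) (l acc : List Char),
      l.length ≤ fuel →
      PySem.Chars.replace.go old new fuel l acc = acc.reverse ++ pvReplaceP old new l := by
  intro fuel
  induction fuel with
  | zero =>
    intro l acc hl
    have : l = [] := by cases l <;> simp_all
    subst this
    rw [PySem.Chars.replace.go.eq_def]
    simp [pvReplaceP]
  | succ fuel ih =>
    intro l acc hl
    cases l with
    | nil =>
      rw [PySem.Chars.replace.go.eq_def]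
      simp [pvReplaceP]
    | cons c t =>
      rw [PySem.Chars.replace.go.eq_def]
      by_cases hp : old.isPrefixOf (c :: t) = true
      · have hlen : 1 ≤ old.length := by
          cases old with
          | nil => exact absurd rfl hold
          | cons a s => simp
        have hd : (List.drop old.length (c :: t)).length ≤ fuel := by
          simp [List.length_drop]; simp at hl; omega
        simp only [hp, if_true]
        rw [ih _ _ hd]
        rw [pvReplaceP]
        simp [hp, hold]
      · simp only [hp]
        have ht : t.length ≤ fuel := by simp at hl; omega
        rw [ih _ _ ht]
        rw [pvReplaceP]
        simp [hp]

theorem pvSplitOn_eq (sep l : List Char) (hsep : sep ≠ []) :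
    PySem.Chars.splitOn l sep = pvSplitP sep l := by
  unfold PySem.Chars.splitOn
  rw [pvSplitOn_go_eq sep hsep _ _ _ _ (by omega)]
  simp
  exact congrFun List.modifyHead_id _

theorem pvReplace_eq (sep new l : List Char) (hsep : sep ≠ []) :
    PySem.Chars.replace l sep new = pvReplaceP sep new l := by
  unfold PySem.Chars.replace
  have : sep.isEmpty = false := by cases sep <;> simp_all
  rw [this]
  simp only [Bool.false_eq_true, if_false]
  rw [pvReplace_go_eq sep new hsep _ _ _ (by omega)]
  simp

theorem pvFlat_eq (l : List Char) :
    (pvSplitP ['+'] l).flatMap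
        (fun num => "budapest-".toList ++ num ++ "-ker".toList ++ ['+']) =
      "budapest-".toList ++ pvReplaceP ['+'] "-ker+budapest-".toList l ++
        "-ker".toList ++ ['+'] := by
  fun_induction pvSplitP ['+'] l with
  | case1 => simp [pvReplaceP]
  | case2 c t h ih =>
    rw [pvReplaceP]
    simp only [List.flatMap_cons, h, dif_pos]
    rw [ih]
    simp
  | case3 c t h ih =>
    rw [pvReplaceP]
    simp only [h, dif_neg, not_false_iff]
    obtain ⟨hd, rest, hs⟩ := List.exists_cons_of_ne_nil (pvSplitP_ne_nil ['+'] t)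
    rw [hs] at ih ⊢
    simp only [List.flatMap_cons, List.modifyHead_cons] at ih ⊢
    simp only [List.append_assoc, List.cons_append] at ih ⊢
    have ih' := List.append_cancel_left ih
    rw [ih']

-- ===== VERDICT (by name: the statement is the Claim_ definition above) =====
theorem set_district_py_spec : Claim_equal_set_district_py := by
  intro district _
  unfold Spec_set_district_py set_district_py set_district_py_alt
  rw [PySem.List.foldl_append_eq_flatMap, PySem.List.slice_to_neg_one]
  rw [pvSplitOn_eq ['+'] district.toList (by simp),
      pvReplace_eq ['+'] "-ker+budapest-".toList district.toList (by simp)]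
  rw [List.nil_append, pvFlat_eq]
  rw [show ("budapest-".toList ++ pvReplaceP ['+'] "-ker+budapest-".toList district.toList ++
        "-ker".toList ++ ['+']) = ("budapest-".toList ++
        pvReplaceP ['+'] "-ker+budapest-".toList district.toList ++ "-ker".toList) ++ ['+'] by simp]
  rw [List.dropLast_concat]
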